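-- pv_equiv track=rewrite | github.com/ansivul/vega | Python/LinkedIn/parser.py | find_all_keywords
-- ===== SOURCE A (Python) =====
-- def find_all_keywords(text, keywords, soft_filter=False):
--     text = text.lower()
--     matches = []
--     for phrase in keywords:
--         words = phrase.lower().split()
--         if soft_filter:
--             if any(w in text for w in words):
--                 matches.append(phrase)
--         else:
--             if all(w in text for w in words):
--                 matches.append(phrase)
--     return matches
-- ===== SOURCE B (Python) =====
-- def find_all_keywords(text, keywords, soft_filter=False):
--     t = text.lower()
--     lengths = {len(w) for phrase in keywords for w in phrase.lower().split()}
--     windows = set()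
--     for L in lengths:
--         for i in range(len(t) - L + 1):
--             windows.add(t[i:i+L])
--     matches = []
--     for phrase in keywords:
--         ws = phrase.lower().split()
--         ok = any(w in windows for w in ws) if soft_filter else all(w in windows for w in ws)
--         if ok:
--             matches.append(phrase)
--     return matches
-- ===== Notes on version B (the rewrite author's own statement) =====
-- stated objective: faster
-- what changed: B is text-driven instead of word-driven: one windowing pass over the lowered text collects every substring of each needed word length into a hash set, and each phrase is then decided by pure set lookups, so no per-word substring search over the text remains.
import Mathlib
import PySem

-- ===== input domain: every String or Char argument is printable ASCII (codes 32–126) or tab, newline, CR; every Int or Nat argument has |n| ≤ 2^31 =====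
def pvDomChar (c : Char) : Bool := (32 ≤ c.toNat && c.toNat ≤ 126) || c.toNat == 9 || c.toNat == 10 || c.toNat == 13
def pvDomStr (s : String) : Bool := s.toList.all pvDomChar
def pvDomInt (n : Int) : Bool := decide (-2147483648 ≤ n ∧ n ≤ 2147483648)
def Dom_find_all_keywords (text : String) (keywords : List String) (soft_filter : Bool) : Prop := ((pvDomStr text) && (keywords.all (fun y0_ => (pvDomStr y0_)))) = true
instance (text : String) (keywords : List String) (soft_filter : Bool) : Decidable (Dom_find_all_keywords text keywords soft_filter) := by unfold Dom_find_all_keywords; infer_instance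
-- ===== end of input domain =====

-- B is text-driven instead of word-driven: one windowing pass over the lowered text collects every
-- substring of each needed word length into a set, and phrases are then decided by set lookups
-- (objective: alternative algorithm, no per-word substring search).

-- ===== PORT A =====
def find_all_keywords (text : String) (keywords : List String) (soft_filter : Bool) : List String :=
  let t := PySem.Str.lower text
  keywords.foldl (fun ms phrase =>
    let words := PySem.Str.split₀ (PySem.Str.lower phrase)
    if soft_filter then
      if words.any (fun w => PySem.Str.isIn w t) then ms ++ [phrase] else ms
    else
      if words.all (fun w => PySem.Str.isIn w t) then ms ++ [phrase] else ms) []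

-- ===== PORT B =====
-- the set comprehension {len(w) for phrase in keywords for w in phrase.lower().split()}
def fakLengths (keywords : List String) : PySem.Set Int :=
  PySem.Set.ofList (keywords.flatMap (fun phrase =>
    (PySem.Str.split₀ (PySem.Str.lower phrase)).map (fun w => PySem.Str.len w)))

-- the windowing pass: for L in lengths: for i in range(len(t)-L+1): windows.add(t[i:i+L])
-- (iterating the Python set 'lengths' only builds another set, so the result is order-independent)
def fakWindows (t : String) (lengths : List Int) : PySem.Set String :=
  lengths.foldl (fun s L =>
    (PySem.List.pyRange 0 (PySem.Str.len t - L + 1) 1).foldl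
      (fun s i => PySem.Set.add s (PySem.Str.slice t (some i) (some (i + L)))) s)
    PySem.Set.empty

def find_all_keywords_alt (text : String) (keywords : List String) (soft_filter : Bool) : List String :=
  let t := PySem.Str.lower text
  let windows := fakWindows t (fakLengths keywords)
  keywords.foldl (fun ms phrase =>
    let ws := PySem.Str.split₀ (PySem.Str.lower phrase)
    let ok := if soft_filter then ws.any (fun w => PySem.Set.contains windows w)
              else ws.all (fun w => PySem.Set.contains windows w)
    if ok then ms ++ [phrase] else ms) []

-- ===== PRECONDITION & SPEC =====
def Spec_find_all_keywords (text : String) (keywords : List String) (soft_filter : Bool) (out : List String) : Prop := out = find_all_keywords_alt text keywords soft_filter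
instance (text : String) (keywords : List String) (soft_filter : Bool) (out : List String) : Decidable (Spec_find_all_keywords text keywords soft_filter out) := by unfold Spec_find_all_keywords; infer_instance

-- ===== CLAIM (what is proved, stated in full; the proofs are below) =====
def Claim_equal_find_all_keywords : Prop := ∀ (text : String) (keywords : List String) (soft_filter : Bool), Dom_find_all_keywords text keywords soft_filter → Spec_find_all_keywords text keywords soft_filter (find_all_keywords text keywords soft_filter)

-- ===== LEMMAS AND PROOFS =====

-- membership in the window set, characterised
theorem mem_fakWindows (t : String) (lengths : List Int) (y : String) :
    y ∈ fakWindows t lengths ↔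
      ∃ L ∈ lengths, ∃ i ∈ PySem.List.pyRange 0 (PySem.Str.len t - L + 1) 1,
        y = PySem.Str.slice t (some i) (some (i + L)) := by
  unfold fakWindows
  suffices h : ∀ (s : PySem.Set String),
      y ∈ lengths.foldl (fun s L =>
        (PySem.List.pyRange 0 (PySem.Str.len t - L + 1) 1).foldl
          (fun s i => PySem.Set.add s (PySem.Str.slice t (some i) (some (i + L)))) s) s
      ↔ y ∈ s ∨ ∃ L ∈ lengths, ∃ i ∈ PySem.List.pyRange 0 (PySem.Str.len t - L + 1) 1,
          y = PySem.Str.slice t (some i) (some (i + L)) by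
    rw [h PySem.Set.empty]
    simp [PySem.Set.empty]
  induction lengths with
  | nil => intro s; simp
  | cons L ls ih =>
    intro s
    simp only [List.foldl_cons, ih, PySem.Set.mem_foldl_add]
    constructor
    · rintro (⟨hy | ⟨i, hi, hy⟩⟩ | ⟨L', hL', i, hi, hy⟩)
      · exact Or.inl hy
      · exact Or.inr ⟨L, List.mem_cons_self, i, hi, hy⟩
      · exact Or.inr ⟨L', List.mem_cons_of_mem _ hL', i, hi, hy⟩
    · rintro (hy | ⟨L', hL', i, hi, hy⟩)
      · exact Or.inl (Or.inl hy)
      · rcases List.mem_cons.mp hL' with h | h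
        · exact Or.inl (Or.inr ⟨i, h ▸ hi, h ▸ hy⟩)
        · exact Or.inr ⟨L', h, i, hi, hy⟩

theorem str_len_eq (s : String) : PySem.Str.len s = (s.toList.length : Int) := rfl

-- the heart of B's correctness: a word whose length was collected is in the window set iff it occurs in t
theorem contains_fakWindows (t w : String) (lengths : List Int)
    (hL : PySem.Str.len w ∈ lengths) (hpos : ∀ L' ∈ lengths, 0 ≤ L') :
    PySem.Set.contains (fakWindows t lengths) w = PySem.Str.isIn w t := by
  apply Bool.eq_iff_iff.mpr
  rw [PySem.Set.contains_iff, mem_fakWindows, PySem.Str.isIn_iff_infix]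
  constructor
  · rintro ⟨L, hLmem, i, hi, hy⟩
    rw [PySem.List.mem_pyRange_one] at hi
    obtain ⟨hi0, hiub⟩ := hi
    have hL0 : (0 : Int) ≤ L := hpos L hLmem
    have : w.toList = List.take ((i + L).toNat - i.toNat) (List.drop i.toNat t.toList) := by
      rw [hy, PySem.Str.toList_slice]
      simp only [PySem.Chars.slice_eq_listSlice]
      rw [PySem.List.slice_toNat t.toList hi0 (by omega)]
    rw [this]
    exact List.IsInfix.trans (List.IsPrefix.isInfix (List.take_prefix _ _))
      (List.IsSuffix.isInfix (List.drop_suffix _ _))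
  · intro hinf
    obtain ⟨j, hpre⟩ := PySem.Chars.exists_prefix_drop_iff_isIn w.toList t.toList |>.symm.mp
      ((PySem.Chars.isIn_iff_infix _ _).mpr hinf)
    -- normalise j into range
    set n := t.toList.length with hn
    have hpre' : w.toList <+: List.drop (min j n) t.toList := by
      by_cases hj : j ≤ n
      · rwa [min_eq_left hj]
      · have : List.drop j t.toList = [] := List.drop_eq_nil_of_le (by omega)
        rw [this] at hpre
        have : w.toList = [] := List.prefix_nil.mp hpre
        simp [this]
    set j0 := min j n with hj0
    have hlen : w.toList.length ≤ n - j0 := by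
      have := hpre'.length_le
      simpa using this
    have hj0n : j0 ≤ n := min_le_right _ _
    refine ⟨PySem.Str.len w, hL, (j0 : Int), ?_, ?_⟩
    · rw [PySem.List.mem_pyRange_one]
      have hwl := str_len_eq w
      have htl := str_len_eq t
      constructor
      · omega
      · omega
    · apply String.toList_inj.mp
      rw [PySem.Str.toList_slice]
      simp only [PySem.Chars.slice_eq_listSlice]
      have hwl := str_len_eq w
      have h0 : (0 : Int) ≤ (j0 : Int) := by positivity
      rw [PySem.List.slice_toNat t.toList h0 (by omega)]
      have htake : ((j0 : Int) + PySem.Str.len w).toNat - ((j0 : Int)).toNat = w.toList.length := by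
        omega
      rw [htake]
      exact (List.prefix_iff_eq_take.mp hpre')

-- every collected length is a word length, hence nonnegative
theorem fakLengths_nonneg (keywords : List String) : ∀ L ∈ fakLengths keywords, 0 ≤ L := by
  intro L hL
  unfold fakLengths at hL
  rw [PySem.Set.mem_ofList] at hL
  obtain ⟨p, _, hL⟩ := List.mem_flatMap.mp hL
  obtain ⟨w, _, hw⟩ := List.mem_map.mp hL
  rw [← hw, str_len_eq]
  positivity

-- each word's length of each phrase is collected
theorem len_mem_fakLengths (keywords : List String) (phrase : String) (hp : phrase ∈ keywords)
    (w : String) (hw : w ∈ PySem.Str.split₀ (PySem.Str.lower phrase)) :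
    PySem.Str.len w ∈ fakLengths keywords := by
  unfold fakLengths
  rw [PySem.Set.mem_ofList]
  exact List.mem_flatMap.mpr ⟨phrase, hp, List.mem_map.mpr ⟨w, hw, rfl⟩⟩

-- ===== VERDICT (by name: the statement is the Claim_ definition above) =====
theorem find_all_keywords_spec : Claim_equal_find_all_keywords := by
  intro text keywords soft_filter _
  show find_all_keywords text keywords soft_filter = find_all_keywords_alt text keywords soft_filter
  unfold find_all_keywords find_all_keywords_alt
  apply PySem.List.foldl_congr_mem
  intro acc phrase hmem
  have hword : ∀ w ∈ PySem.Str.split₀ (PySem.Str.lower phrase),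
      PySem.Str.isIn w (PySem.Str.lower text)
        = PySem.Set.contains (fakWindows (PySem.Str.lower text) (fakLengths keywords)) w := by
    intro w hw
    exact (contains_fakWindows (PySem.Str.lower text) w (fakLengths keywords)
      (len_mem_fakLengths keywords phrase hmem w hw) (fakLengths_nonneg keywords)).symm
  have hany : (PySem.Str.split₀ (PySem.Str.lower phrase)).any (fun w => PySem.Str.isIn w (PySem.Str.lower text))
      = (PySem.Str.split₀ (PySem.Str.lower phrase)).any (fun w => PySem.Set.contains (fakWindows (PySem.Str.lower text) (fakLengths keywords)) w) :=
    PySem.List.any_congr_mem hword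
  have hall : (PySem.Str.split₀ (PySem.Str.lower phrase)).all (fun w => PySem.Str.isIn w (PySem.Str.lower text))
      = (PySem.Str.split₀ (PySem.Str.lower phrase)).all (fun w => PySem.Set.contains (fakWindows (PySem.Str.lower text) (fakLengths keywords)) w) := by
    apply Bool.eq_iff_iff.mpr
    simp only [List.all_eq_true]
    exact ⟨fun h w hw => (hword w hw) ▸ h w hw, fun h w hw => (hword w hw) ▸ h w hw⟩
  cases soft_filter <;> simp only [Bool.false_eq_true, if_false, if_true, hany, hall]
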